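-- pv_equiv track=rewrite | github.com/aotoyae/problem-solving | python/programmers/level.1/prgm_258712_1.py | solution
-- ===== SOURCE A (Python) =====
-- def solution(friends, gifts):
--     answer = 0
--     gift_dic={k: {j: 0 for j in friends if j != k} for k in friends}
--     gives = {k: 0 for k in friends}
--     gets = {k: 0 for k in friends}
--
--     for gift in gifts:
--         send, target = gift.split()
--         gift_dic[send][target] += 1
--         gives[send] += 1
--         gets[target] += 1
--
--     for k in gift_dic.keys():
--         count = 0
--
--         for kk in gift_dic[k].keys():
--             if gift_dic[k][kk] > gift_dic[kk][k]:
--                 count += 1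
--             elif gift_dic[k][kk] == gift_dic[kk][k]:
--                 if gives[k] - gets[k] > gives[kk] - gets[kk]:
--                     count += 1
--         answer = max(answer, count)
--
--     return answer
-- ===== SOURCE B (Python) =====
-- def solution(friends, gifts):
--     names = list(dict.fromkeys(friends))
--     cnt = {}
--     balance = {k: 0 for k in names}
--     for gift in gifts:
--         send, target = gift.split()
--         cnt[(send, target)] = cnt.get((send, target), 0) + 1
--         balance[send] += 1
--         balance[target] -= 1
--     score = {k: 0 for k in names}
--     rest = names
--     while len(rest) > 1:
--         a, rest = rest[0], rest[1:]
--         for b in rest: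
--             ab = cnt.get((a, b), 0)
--             ba = cnt.get((b, a), 0)
--             if ab > ba:
--                 score[a] += 1
--             elif ba > ab:
--                 score[b] += 1
--             elif balance[a] > balance[b]:
--                 score[a] += 1
--             elif balance[b] > balance[a]:
--                 score[b] += 1
--     return max(score.values(), default=0)
-- ===== Notes on version B (the rewrite author's own statement) =====
-- stated objective: alternative
-- what changed: Instead of A's per-friend rescan of nested gift dicts (for each friend, loop over all others and recount wins), B makes one pass over unordered pairs via a shrinking-suffix loop, awarding each duel's winner into a score table, using a pair-keyed gift counter and a single net-balance dict, and returns max(score.values(), default=0).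
import Mathlib
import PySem

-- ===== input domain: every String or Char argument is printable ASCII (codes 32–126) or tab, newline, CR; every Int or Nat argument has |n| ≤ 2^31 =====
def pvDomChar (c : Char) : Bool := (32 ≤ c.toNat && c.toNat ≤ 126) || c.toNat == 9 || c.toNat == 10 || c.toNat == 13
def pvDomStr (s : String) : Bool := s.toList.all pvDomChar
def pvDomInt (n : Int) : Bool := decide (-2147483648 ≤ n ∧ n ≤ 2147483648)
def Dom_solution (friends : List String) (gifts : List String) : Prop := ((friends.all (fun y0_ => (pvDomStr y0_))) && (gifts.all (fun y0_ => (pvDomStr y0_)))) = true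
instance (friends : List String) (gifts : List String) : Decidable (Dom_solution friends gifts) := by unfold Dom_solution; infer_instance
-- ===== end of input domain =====

-- B replaces A's per-friend double scan over nested dicts by a single pass over unordered pairs
-- (a shrinking-suffix loop) awarding each duel's winner into a score table, with a pair-keyed gift
-- counter and one net-balance dict; same asymptotic cost, different decomposition.

-- ===== PORT A =====
def pvStepA (st : PySem.Dict String (PySem.Dict String Int) × PySem.Dict String Int × PySem.Dict String Int)
    (gift : String) :
    PySem.Dict String (PySem.Dict String Int) × PySem.Dict String Int × PySem.Dict String Int :=
  match PySem.Str.split₀ gift with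
  | [send, target] =>
      (st.1.modify send PySem.Dict.empty (fun inner => inner.modify target 0 (· + 1)),
       st.2.1.modify send 0 (· + 1),
       st.2.2.modify target 0 (· + 1))
  | _ => st  -- unreachable under Pre_ (Python raises ValueError there)

def solution (friends : List String) (gifts : List String) : Int :=
  let giftDic0 : PySem.Dict String (PySem.Dict String Int) :=
    PySem.Dict.ofList (friends.map (fun k =>
      (k, PySem.Dict.ofList ((friends.filter (fun j => j != k)).map (fun j => (j, (0 : Int)))))))
  let gives0 : PySem.Dict String Int := PySem.Dict.ofList (friends.map (fun k => (k, (0 : Int))))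
  let gets0 : PySem.Dict String Int := PySem.Dict.ofList (friends.map (fun k => (k, (0 : Int))))
  let st := gifts.foldl pvStepA (giftDic0, gives0, gets0)
  let giftDic := st.1
  let gives := st.2.1
  let gets := st.2.2
  giftDic.keys.foldl (fun answer k =>
    let count := (giftDic.getD k PySem.Dict.empty).keys.foldl (fun count kk =>
      if (giftDic.getD k PySem.Dict.empty).getD kk 0 > (giftDic.getD kk PySem.Dict.empty).getD k 0 then
        count + 1
      else if (giftDic.getD k PySem.Dict.empty).getD kk 0 = (giftDic.getD kk PySem.Dict.empty).getD k 0 then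
        (if gives.getD k 0 - gets.getD k 0 > gives.getD kk 0 - gets.getD kk 0 then count + 1 else count)
      else count) (0 : Int)
    max answer count) (0 : Int)

-- ===== PORT B =====
def pvStepB (st : PySem.Dict (String × String) Int × PySem.Dict String Int) (gift : String) :
    PySem.Dict (String × String) Int × PySem.Dict String Int :=
  match PySem.Str.split₀ gift with
  | [send, target] =>
      (st.1.insert (send, target) (st.1.getD (send, target) 0 + 1),
       (st.2.modify send 0 (· + 1)).modify target 0 (· - 1))
  | _ => st  -- unreachable under Pre_

def pvAward (cnt : PySem.Dict (String × String) Int) (bal : PySem.Dict String Int)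
    (a : String) (score : PySem.Dict String Int) (b : String) : PySem.Dict String Int :=
  let ab := cnt.getD (a, b) 0
  let ba := cnt.getD (b, a) 0
  if ab > ba then score.modify a 0 (· + 1)
  else if ba > ab then score.modify b 0 (· + 1)
  else if bal.getD a 0 > bal.getD b 0 then score.modify a 0 (· + 1)
  else if bal.getD b 0 > bal.getD a 0 then score.modify b 0 (· + 1)
  else score

def pvScoreLoop (cnt : PySem.Dict (String × String) Int) (bal : PySem.Dict String Int) :
    List String → PySem.Dict String Int → PySem.Dict String Int
  | a :: b :: tl, score => pvScoreLoop cnt bal (b :: tl) ((b :: tl).foldl (pvAward cnt bal a) score)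
  | _, score => score

def solution_alt (friends : List String) (gifts : List String) : Int :=
  let names := PySem.List.dedup friends
  let st := gifts.foldl pvStepB
    (PySem.Dict.empty, PySem.Dict.ofList (names.map (fun k => (k, (0 : Int)))))
  let score0 : PySem.Dict String Int := PySem.Dict.ofList (names.map (fun k => (k, (0 : Int))))
  let score := pvScoreLoop st.1 st.2 names score0
  PySem.List.maxD score.values (fun y => y) 0

-- ===== PRECONDITION & SPEC =====
-- Pre_ excludes exactly the inputs where the Python A raises: a gift line that does not split into
-- exactly two tokens (ValueError), or whose sender/receiver is not a friend or equals itself (KeyError).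
def pvGiftOK (friends : List String) (g : String) : Bool :=
  match PySem.Str.split₀ g with
  | [s, t] => friends.contains s && friends.contains t && s != t
  | _ => false

def Pre_solution (friends : List String) (gifts : List String) : Prop :=
  gifts.all (pvGiftOK friends) = true
instance (friends : List String) (gifts : List String) : Decidable (Pre_solution friends gifts) := by
  unfold Pre_solution; infer_instance

def pvWitness_solution : List String × List String := (["a", "b"], ["a b"])

def Spec_solution (friends : List String) (gifts : List String) (out : Int) : Prop :=
  out = solution_alt friends gifts
instance (friends : List String) (gifts : List String) (out : Int) : Decidable (Spec_solution friends gifts out) := by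
  unfold Spec_solution; infer_instance

-- ===== CLAIM (what is proved, stated in full; the proofs are below) =====
def Claim_equal_solution : Prop := ∀ (friends : List String) (gifts : List String),
  Dom_solution friends gifts → Pre_solution friends gifts →
  Spec_solution friends gifts (solution friends gifts)


-- ===== LEMMAS AND PROOFS =====

-- pure description of one gift line (used only by the proofs)
def pvParse (g : String) : String × String :=
  match PySem.Str.split₀ g with
  | [s, t] => (s, t)
  | _ => ("", "")

def pvGc (gifts : List String) (a b : String) : Int :=
  (gifts.countP (fun g => pvParse g == (a, b)) : Int)

def pvBalP (gifts : List String) (k : String) : Int :=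
  (gifts.countP (fun g => (pvParse g).1 == k) : Int) - (gifts.countP (fun g => (pvParse g).2 == k) : Int)

def pvWins (gifts : List String) (k kk : String) : Bool :=
  decide (pvGc gifts k kk > pvGc gifts kk k ∨
    (pvGc gifts k kk = pvGc gifts kk k ∧ pvBalP gifts k > pvBalP gifts kk))

def pvWinsD (cnt : PySem.Dict (String × String) Int) (bal : PySem.Dict String Int) (a b : String) : Bool :=
  decide (cnt.getD (a, b) 0 > cnt.getD (b, a) 0 ∨
    (cnt.getD (a, b) 0 = cnt.getD (b, a) 0 ∧ bal.getD a 0 > bal.getD b 0))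

def pvCount (friends gifts : List String) (k : String) : Nat :=
  (PySem.List.dedup friends).countP (fun kk => kk != k && pvWins gifts k kk)

lemma pvGiftOK_elim {friends : List String} {g : String} (h : pvGiftOK friends g = true) :
    ∃ s t, PySem.Str.split₀ g = [s, t] ∧ pvParse g = (s, t) ∧ s ∈ friends ∧ t ∈ friends ∧ s ≠ t := by
  unfold pvGiftOK at h
  unfold pvParse
  rcases hsp : PySem.Str.split₀ g with _ | ⟨s, _ | ⟨t, _ | _⟩⟩ <;> rw [hsp] at h <;> simp_all

lemma pvGetD_foldl_insert {ν : Type} (f : String → ν) (l : List String)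
    (d : PySem.Dict String ν) (x : String) (dflt : ν) :
    ((l.foldl (fun d k => d.insert k (f k)) d)).getD x dflt
      = if x ∈ l then f x else d.getD x dflt := by
  induction l generalizing d with
  | nil => simp
  | cons k l ih =>
    simp only [List.foldl_cons, ih, PySem.Dict.getD_insert, List.mem_cons]
    by_cases h1 : x ∈ l <;> by_cases h2 : x = k <;> simp [h1, h2]

lemma pvGetD_ofList_map {ν : Type} (f : String → ν) (l : List String) (x : String) (dflt : ν) :
    (PySem.Dict.ofList (l.map (fun k => (k, f k)))).getD x dflt = if x ∈ l then f x else dflt := by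
  show ((l.map (fun k => (k, f k))).foldl (fun acc p => acc.insert p.1 p.2) PySem.Dict.empty).getD x dflt = _
  rw [List.foldl_map]
  simp [pvGetD_foldl_insert]

lemma pvGetD_ofList_zero (l : List String) (x : String) :
    (PySem.Dict.ofList (l.map (fun k => (k, (0 : Int))))).getD x 0 = 0 := by
  rw [pvGetD_ofList_map]; split <;> rfl

lemma pvKeys_ofList_map {ν : Type} (f : String → ν) (l : List String) :
    (PySem.Dict.ofList (l.map (fun k => (k, f k)))).keys = PySem.List.dedup l := by
  show ((l.map (fun k => (k, f k))).foldl (fun acc p => acc.insert p.1 p.2) PySem.Dict.empty).keys = _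
  rw [List.foldl_map, PySem.Dict.keys_foldl_insert_key (key := fun k => k) (f := fun _ k => f k)]
  simp [PySem.Set.update_nil_left]

lemma pvAfold (friends gifts : List String) (hp : ∀ g ∈ gifts, pvGiftOK friends g = true)
    (d : PySem.Dict String (PySem.Dict String Int)) (gv gt : PySem.Dict String Int)
    (hc : ∀ g ∈ gifts, d.contains (pvParse g).1 = true ∧
      (d.getD (pvParse g).1 PySem.Dict.empty).contains (pvParse g).2 = true) :
    (∀ k kk, ((gifts.foldl pvStepA (d, gv, gt)).1.getD k PySem.Dict.empty).getD kk 0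
        = (d.getD k PySem.Dict.empty).getD kk 0 + (gifts.countP (fun g => pvParse g == (k, kk)) : Int))
    ∧ (∀ k, (gifts.foldl pvStepA (d, gv, gt)).2.1.getD k 0
        = gv.getD k 0 + (gifts.countP (fun g => (pvParse g).1 == k) : Int))
    ∧ (∀ k, (gifts.foldl pvStepA (d, gv, gt)).2.2.getD k 0
        = gt.getD k 0 + (gifts.countP (fun g => (pvParse g).2 == k) : Int))
    ∧ (gifts.foldl pvStepA (d, gv, gt)).1.keys = d.keys
    ∧ (∀ k, ((gifts.foldl pvStepA (d, gv, gt)).1.getD k PySem.Dict.empty).keys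
        = (d.getD k PySem.Dict.empty).keys) := by
  induction gifts generalizing d gv gt with
  | nil => simp
  | cons g gs ih =>
    obtain ⟨s, t, hsp, hpg, hs, ht, hne⟩ := pvGiftOK_elim (hp g (List.mem_cons_self))
    have hcg := hc g (List.mem_cons_self)
    rw [hpg] at hcg
    have hstep : pvStepA (d, gv, gt) g
        = (d.modify s PySem.Dict.empty (fun inner => inner.modify t 0 (· + 1)),
           gv.modify s 0 (· + 1), gt.modify t 0 (· + 1)) := by
      simp [pvStepA, hsp]
    have hdget : ∀ k, (d.modify s PySem.Dict.empty
          (fun inner => inner.modify t 0 (· + 1))).getD k PySem.Dict.empty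
        = if k = s then (d.getD s PySem.Dict.empty).modify t 0 (· + 1)
          else d.getD k PySem.Dict.empty := by
      intro k; rw [PySem.Dict.getD_modify]
    obtain ⟨ihv, ihgv, ihgt, ihk, ihik⟩ := ih (fun g' hg' => hp g' (List.mem_cons_of_mem _ hg'))
      (d.modify s PySem.Dict.empty (fun inner => inner.modify t 0 (· + 1)))
      (gv.modify s 0 (· + 1)) (gt.modify t 0 (· + 1))
      (by
        intro g' hg'
        obtain ⟨h1, h2⟩ := hc g' (List.mem_cons_of_mem _ hg')
        refine ⟨by rw [PySem.Dict.contains_modify]; simp [h1], ?_⟩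
        rw [hdget]
        split
        next heq =>
          rw [PySem.Dict.contains_modify]
          rw [heq] at h2
          simp [h2]
        next => exact h2)
    refine ⟨?_, ?_, ?_, ?_, ?_⟩
    · intro k kk
      rw [List.foldl_cons, hstep, ihv k kk, hdget, List.countP_cons]
      have hbeq : (pvParse g == (k, kk)) = (decide (s = k) && decide (t = kk)) := by
        rw [hpg]; by_cases h1 : s = k <;> by_cases h2 : t = kk <;>
          simp [beq_iff_eq, Prod.ext_iff, h1, h2]
      rw [hbeq]
      by_cases h1 : k = s
      · subst h1
        rw [if_pos rfl, PySem.Dict.getD_modify]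
        by_cases h2 : kk = t
        · subst h2; simp; omega
        · simp [h2, Ne.symm h2]
      · simp [h1, Ne.symm h1]
    · intro k
      rw [List.foldl_cons, hstep, ihgv k, PySem.Dict.getD_modify, List.countP_cons, hpg]
      by_cases h1 : k = s
      · subst h1; simp; omega
      · simp [h1, Ne.symm h1]
    · intro k
      rw [List.foldl_cons, hstep, ihgt k, PySem.Dict.getD_modify, List.countP_cons, hpg]
      by_cases h1 : k = t
      · subst h1; simp; omega
      · simp [h1, Ne.symm h1]
    · rw [List.foldl_cons, hstep, ihk, PySem.Dict.keys_modify,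
        PySem.Dict.keys_insert_of_contains _ _ hcg.1]
    · intro k
      rw [List.foldl_cons, hstep, ihik, hdget]
      split
      next heq =>
        rw [PySem.Dict.keys_modify, heq,
          PySem.Dict.keys_insert_of_contains _ _ hcg.2]
      next => rfl

lemma pvBfold (friends gifts : List String) (hp : ∀ g ∈ gifts, pvGiftOK friends g = true)
    (c : PySem.Dict (String × String) Int) (b : PySem.Dict String Int) :
    (∀ p, (gifts.foldl pvStepB (c, b)).1.getD p 0
        = c.getD p 0 + (gifts.countP (fun g => pvParse g == p) : Int))
    ∧ (∀ k, (gifts.foldl pvStepB (c, b)).2.getD k 0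
        = b.getD k 0 + (gifts.countP (fun g => (pvParse g).1 == k) : Int)
            - (gifts.countP (fun g => (pvParse g).2 == k) : Int)) := by
  induction gifts generalizing c b with
  | nil => simp
  | cons g gs ih =>
    obtain ⟨s, t, hsp, hpg, _, _, _⟩ := pvGiftOK_elim (hp g (List.mem_cons_self))
    have hstep : pvStepB (c, b) g
        = (c.insert (s, t) (c.getD (s, t) 0 + 1),
           (b.modify s 0 (· + 1)).modify t 0 (· - 1)) := by
      simp [pvStepB, hsp]
    obtain ⟨ihc, ihb⟩ := ih (fun g' hg' => hp g' (List.mem_cons_of_mem _ hg'))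
      (c.insert (s, t) (c.getD (s, t) 0 + 1)) ((b.modify s 0 (· + 1)).modify t 0 (· - 1))
    refine ⟨?_, ?_⟩
    · intro p
      rw [List.foldl_cons, hstep, ihc p, PySem.Dict.getD_insert, List.countP_cons, hpg]
      by_cases h1 : p = (s, t)
      · subst h1; simp; omega
      · simp [h1, Ne.symm h1]
    · intro k
      rw [List.foldl_cons, hstep, ihb k, List.countP_cons, List.countP_cons, hpg]
      simp only [PySem.Dict.getD_modify, beq_iff_eq]
      split_ifs <;> subst_vars <;> simp_all <;> omega

lemma pvAward_getD (cnt : PySem.Dict (String × String) Int) (bal : PySem.Dict String Int)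
    (a : String) (score : PySem.Dict String Int) (b k : String) :
    (pvAward cnt bal a score b).getD k 0 = score.getD k 0
      + (if k = a ∧ pvWinsD cnt bal a b then 1 else 0)
      + (if k = b ∧ pvWinsD cnt bal b a then 1 else 0) := by
  have hT : ∀ x y : String, (cnt.getD (x, y) 0 > cnt.getD (y, x) 0 ∨
      (cnt.getD (x, y) 0 = cnt.getD (y, x) 0 ∧ bal.getD x 0 > bal.getD y 0)) →
      pvWinsD cnt bal x y = true := by
    intro x y h; simpa [pvWinsD] using h
  have hF : ∀ x y : String, ¬ (cnt.getD (x, y) 0 > cnt.getD (y, x) 0 ∨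
      (cnt.getD (x, y) 0 = cnt.getD (y, x) 0 ∧ bal.getD x 0 > bal.getD y 0)) →
      pvWinsD cnt bal x y = false := by
    intro x y h; simpa [pvWinsD] using h
  have hA : pvAward cnt bal a score b =
      (if cnt.getD (a, b) 0 > cnt.getD (b, a) 0 then score.modify a 0 (· + 1)
       else if cnt.getD (b, a) 0 > cnt.getD (a, b) 0 then score.modify b 0 (· + 1)
       else if bal.getD a 0 > bal.getD b 0 then score.modify a 0 (· + 1)
       else if bal.getD b 0 > bal.getD a 0 then score.modify b 0 (· + 1)
       else score) := rfl
  rw [hA]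
  by_cases h1 : cnt.getD (a, b) 0 > cnt.getD (b, a) 0
  · have hne : a ≠ b := by rintro rfl; omega
    rw [if_pos h1, hT a b (Or.inl h1), hF b a (by rintro (h | ⟨h, _⟩) <;> omega),
      PySem.Dict.getD_modify]
    split_ifs <;> simp_all
  · rw [if_neg h1]
    by_cases h2 : cnt.getD (b, a) 0 > cnt.getD (a, b) 0
    · have hne : a ≠ b := by rintro rfl; omega
      rw [if_pos h2, hF a b (by rintro (h | ⟨h, _⟩) <;> omega), hT b a (Or.inl h2),
        PySem.Dict.getD_modify]
      split_ifs <;> simp_all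
    · rw [if_neg h2]
      by_cases h3 : bal.getD a 0 > bal.getD b 0
      · have hne : a ≠ b := by rintro rfl; omega
        rw [if_pos h3, hT a b (Or.inr ⟨by omega, h3⟩),
          hF b a (by rintro (h | ⟨h, hb⟩) <;> omega), PySem.Dict.getD_modify]
        split_ifs <;> simp_all
      · rw [if_neg h3]
        by_cases h4 : bal.getD b 0 > bal.getD a 0
        · have hne : a ≠ b := by rintro rfl; omega
          rw [if_pos h4, hF a b (by rintro (h | ⟨h, hb⟩) <;> omega),
            hT b a (Or.inr ⟨by omega, h4⟩), PySem.Dict.getD_modify]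
          split_ifs <;> simp_all
        · rw [if_neg h4, hF a b (by rintro (h | ⟨h, hb⟩) <;> omega),
            hF b a (by rintro (h | ⟨h, hb⟩) <;> omega)]
          simp

lemma pvAward_keys (cnt : PySem.Dict (String × String) Int) (bal : PySem.Dict String Int)
    (a : String) (score : PySem.Dict String Int) (b : String)
    (ha : score.contains a = true) (hb : score.contains b = true) :
    (pvAward cnt bal a score b).keys = score.keys := by
  have hA : pvAward cnt bal a score b =
      (if cnt.getD (a, b) 0 > cnt.getD (b, a) 0 then score.modify a 0 (· + 1)
       else if cnt.getD (b, a) 0 > cnt.getD (a, b) 0 then score.modify b 0 (· + 1)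
       else if bal.getD a 0 > bal.getD b 0 then score.modify a 0 (· + 1)
       else if bal.getD b 0 > bal.getD a 0 then score.modify b 0 (· + 1)
       else score) := rfl
  rw [hA]
  split_ifs <;>
    simp only [PySem.Dict.keys_modify] <;>
    first
      | rw [PySem.Dict.keys_insert_of_contains _ _ ha]
      | rw [PySem.Dict.keys_insert_of_contains _ _ hb]
      | rfl

lemma pvWinsD_irrefl (cnt : PySem.Dict (String × String) Int) (bal : PySem.Dict String Int)
    (x : String) : pvWinsD cnt bal x x = false := by
  simp [pvWinsD]

lemma pvInnerFold_self (cnt : PySem.Dict (String × String) Int) (bal : PySem.Dict String Int)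
    (a : String) (tl : List String) (score : PySem.Dict String Int) :
    ((tl.foldl (pvAward cnt bal a) score)).getD a 0
      = score.getD a 0 + (tl.countP (fun b => pvWinsD cnt bal a b) : Int) := by
  induction tl generalizing score with
  | nil => simp
  | cons b tl ih =>
    rw [List.foldl_cons, ih, pvAward_getD, List.countP_cons]
    by_cases hab : a = b
    · subst hab; simp [pvWinsD_irrefl]
    · by_cases hw : pvWinsD cnt bal a b = true <;> simp [hw, hab] <;> omega

lemma pvInnerFold_ne (cnt : PySem.Dict (String × String) Int) (bal : PySem.Dict String Int)
    (a : String) (tl : List String) (score : PySem.Dict String Int) (k : String) (hk : k ≠ a) :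
    ((tl.foldl (pvAward cnt bal a) score)).getD k 0
      = score.getD k 0 + (tl.count k : Int) * (if pvWinsD cnt bal k a then 1 else 0) := by
  induction tl generalizing score with
  | nil => simp
  | cons b tl ih =>
    rw [List.foldl_cons, ih, pvAward_getD, List.count_cons]
    by_cases hkb : k = b
    · subst hkb; by_cases hw : pvWinsD cnt bal k a = true <;> simp [hw, hk] <;> push_cast <;> ring
    · simp [hkb, hk, Ne.symm hkb]

lemma pvInnerFold_keys (cnt : PySem.Dict (String × String) Int) (bal : PySem.Dict String Int)
    (a : String) (tl : List String) (score : PySem.Dict String Int)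
    (ha : a ∈ score.keys) (htl : ∀ x ∈ tl, x ∈ score.keys) :
    ((tl.foldl (pvAward cnt bal a) score)).keys = score.keys := by
  induction tl generalizing score with
  | nil => simp
  | cons b tl ih =>
    rw [List.foldl_cons]
    have hkeys : (pvAward cnt bal a score b).keys = score.keys :=
      pvAward_keys cnt bal a score b
        ((PySem.Dict.contains_iff_mem_keys _ _).mpr ha)
        ((PySem.Dict.contains_iff_mem_keys _ _).mpr (htl b List.mem_cons_self))
    rw [ih _ (by rw [hkeys]; exact ha) (fun x hx => by rw [hkeys]; exact htl x (List.mem_cons_of_mem _ hx)), hkeys]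

lemma pvScoreLoop_keys (cnt : PySem.Dict (String × String) Int) (bal : PySem.Dict String Int)
    (rest : List String) (score : PySem.Dict String Int)
    (h : ∀ x ∈ rest, x ∈ score.keys) :
    (pvScoreLoop cnt bal rest score).keys = score.keys := by
  induction rest generalizing score with
  | nil => rfl
  | cons a tl ih =>
    cases tl with
    | nil => rfl
    | cons b tl2 =>
      show (pvScoreLoop cnt bal (b :: tl2) ((b :: tl2).foldl (pvAward cnt bal a) score)).keys = _
      have hik : ((b :: tl2).foldl (pvAward cnt bal a) score).keys = score.keys :=
        pvInnerFold_keys cnt bal a (b :: tl2) score (h a List.mem_cons_self)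
          (fun x hx => h x (List.mem_cons_of_mem _ hx))
      rw [ih _ (fun x hx => by rw [hik]; exact h x (List.mem_cons_of_mem _ hx)), hik]

lemma pvScoreLoop_getD (cnt : PySem.Dict (String × String) Int) (bal : PySem.Dict String Int)
    (rest : List String) (score : PySem.Dict String Int) (k : String) (hnd : rest.Nodup) :
    (pvScoreLoop cnt bal rest score).getD k 0
      = score.getD k 0 + (if k ∈ rest then
          (rest.countP (fun kk => kk != k && pvWinsD cnt bal k kk) : Int) else 0) := by
  induction rest generalizing score with
  | nil => simp [pvScoreLoop]
  | cons a tl ih =>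
    cases tl with
    | nil =>
      show score.getD k 0 = _
      by_cases hka : k = a
      · subst hka; simp
      · simp [hka]
    | cons b tl2 =>
      have ha : a ∉ b :: tl2 := (List.nodup_cons.mp hnd).1
      have hnd2 : (b :: tl2).Nodup := (List.nodup_cons.mp hnd).2
      show (pvScoreLoop cnt bal (b :: tl2) ((b :: tl2).foldl (pvAward cnt bal a) score)).getD k 0 = _
      rw [ih _ hnd2]
      by_cases hka : k = a
      · subst hka
        rw [pvInnerFold_self]
        have hc : (b :: tl2).countP (fun kk => kk != k && pvWinsD cnt bal k kk)
            = (b :: tl2).countP (fun kk => pvWinsD cnt bal k kk) := by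
          apply List.countP_congr; intro x hx
          have hx' : x ≠ k := fun h => ha (h ▸ hx)
          simp [hx']
        simp [ha, List.countP_cons, hc]
      · rw [pvInnerFold_ne _ _ _ _ _ _ hka]
        by_cases hkm : k ∈ b :: tl2
        · have hcount : (b :: tl2).count k = 1 := List.count_eq_one_of_mem hnd2 hkm
          have hane : a ≠ k := Ne.symm hka
          simp [hkm, hcount, List.countP_cons, hka, hane]
          by_cases hw : pvWinsD cnt bal k a = true <;> simp [hw] <;> omega
        · have hcount : (b :: tl2).count k = 0 := by
            rw [List.count_eq_zero]; exact hkm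
          simp [hkm, hcount, hka]

lemma pvCountP_dedup_filter (p : String → Bool) (k : String) (l : List String) :
    (PySem.List.dedup (l.filter (fun j => j != k))).countP p
      = (PySem.List.dedup l).countP (fun kk => kk != k && p kk) := by
  have hperm : (PySem.List.dedup (l.filter (fun j => j != k))).Perm
      ((PySem.List.dedup l).filter (fun j => j != k)) := by
    rw [List.perm_ext_iff_of_nodup (PySem.List.nodup_dedup _) ((PySem.List.nodup_dedup l).filter _)]
    intro a
    simp [List.mem_filter]
  rw [hperm.countP_eq, List.countP_filter]
  apply List.countP_congr
  intro x _
  simp [Bool.and_comm]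

lemma pvMaxD_eq (xs : List Int) (h : ∀ x ∈ xs, 0 ≤ x) :
    PySem.List.maxD xs (fun y => y) 0 = xs.foldl max 0 := by
  cases xs with
  | nil => rfl
  | cons x t =>
    show (PySem.List.max? (x :: t) (fun y => y)).getD 0 = _
    rw [PySem.List.max?_id_cons]
    have h0x : max 0 x = x := max_eq_right (h x (by simp))
    simp only [Option.getD_some, List.foldl_cons, h0x]

lemma pvChain_eq (gifts : List String) (k kk : String) (c : Int) :
    (if pvGc gifts k kk > pvGc gifts kk k then c + 1
     else if pvGc gifts k kk = pvGc gifts kk k then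
       (if pvBalP gifts k > pvBalP gifts kk then c + 1 else c)
     else c)
      = if pvWins gifts k kk then c + 1 else c := by
  unfold pvWins
  split_ifs <;> simp_all <;> omega

lemma pvDedup_of_nodup (l : List String) (h : l.Nodup) : PySem.List.dedup l = l := by
  calc PySem.List.dedup l = PySem.Set.ofList l := by simp
    _ = PySem.Set.update [] l := (PySem.Set.update_nil_left l).symm
    _ = [] ++ l := PySem.Set.update_eq_append_of_disjoint [] l h (by simp)
    _ = l := by simp

lemma pvA_eq (friends gifts : List String) (hpre : Pre_solution friends gifts) :
    solution friends gifts
      = (PySem.List.dedup friends).foldl (fun ans k => max ans (pvCount friends gifts k : Int)) 0 := by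
  have hp : ∀ g ∈ gifts, pvGiftOK friends g = true := List.all_eq_true.mp hpre
  unfold solution
  dsimp only
  set inner0 : String → PySem.Dict String Int := fun x =>
    PySem.Dict.ofList ((friends.filter (fun j => j != x)).map (fun j => (j, (0 : Int)))) with hinner0
  set d0 : PySem.Dict String (PySem.Dict String Int) :=
    PySem.Dict.ofList (friends.map (fun k => (k, inner0 k))) with hd0
  set g0 : PySem.Dict String Int := PySem.Dict.ofList (friends.map (fun k => (k, (0 : Int)))) with hg0
  have h_d0get : ∀ x, d0.getD x PySem.Dict.empty = if x ∈ friends then inner0 x else PySem.Dict.empty :=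
    fun x => pvGetD_ofList_map inner0 friends x PySem.Dict.empty
  have h_d0keys : d0.keys = PySem.List.dedup friends := pvKeys_ofList_map inner0 friends
  have h_inkeys : ∀ x, (inner0 x).keys = PySem.List.dedup (friends.filter (fun j => j != x)) :=
    fun x => pvKeys_ofList_map _ _
  have h_inget : ∀ x kk, (inner0 x).getD kk 0 = 0 :=
    fun x kk => pvGetD_ofList_zero _ kk
  have h_gget : ∀ x, g0.getD x 0 = 0 := fun x => pvGetD_ofList_zero friends x
  have hc : ∀ g ∈ gifts, d0.contains (pvParse g).1 = true ∧
      (d0.getD (pvParse g).1 PySem.Dict.empty).contains (pvParse g).2 = true := by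
    intro g hg
    obtain ⟨sx, tx, hsp, hpg, hs, ht, hne⟩ := pvGiftOK_elim (hp g hg)
    rw [hpg]
    constructor
    · rw [PySem.Dict.contains_iff_mem_keys, h_d0keys, PySem.List.mem_dedup]
      exact hs
    · rw [h_d0get, if_pos hs, PySem.Dict.contains_iff_mem_keys, h_inkeys,
        PySem.List.mem_dedup, List.mem_filter]
      exact ⟨ht, by simp [Ne.symm hne]⟩
  obtain ⟨hv, hgv, hgt, hkeys, hikeys⟩ := pvAfold friends gifts hp d0 g0 g0 hc
  have hval : ∀ a b, ((gifts.foldl pvStepA (d0, g0, g0)).1.getD a PySem.Dict.empty).getD b 0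
      = pvGc gifts a b := by
    intro a b
    rw [hv a b, h_d0get a]
    unfold pvGc
    split
    · rw [h_inget]; ring
    · simp [PySem.Dict.getD_empty]
  have hbal : ∀ a, (gifts.foldl pvStepA (d0, g0, g0)).2.1.getD a 0
      - (gifts.foldl pvStepA (d0, g0, g0)).2.2.getD a 0 = pvBalP gifts a := by
    intro a
    rw [hgv a, hgt a, h_gget a]
    unfold pvBalP
    ring
  rw [hkeys, h_d0keys]
  apply PySem.List.foldl_congr_mem
  intro acc k hk
  have hkf : k ∈ friends := (PySem.List.mem_dedup _ _).mp hk
  rw [hikeys k, h_d0get k, if_pos hkf, h_inkeys k]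
  have hbody : ∀ (count : Int) (kk : String),
      (if ((gifts.foldl pvStepA (d0, g0, g0)).1.getD k PySem.Dict.empty).getD kk 0 >
          ((gifts.foldl pvStepA (d0, g0, g0)).1.getD kk PySem.Dict.empty).getD k 0 then count + 1
       else if ((gifts.foldl pvStepA (d0, g0, g0)).1.getD k PySem.Dict.empty).getD kk 0 =
          ((gifts.foldl pvStepA (d0, g0, g0)).1.getD kk PySem.Dict.empty).getD k 0 then
         (if (gifts.foldl pvStepA (d0, g0, g0)).2.1.getD k 0 - (gifts.foldl pvStepA (d0, g0, g0)).2.2.getD k 0 >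
             (gifts.foldl pvStepA (d0, g0, g0)).2.1.getD kk 0 - (gifts.foldl pvStepA (d0, g0, g0)).2.2.getD kk 0 then
           count + 1
         else count)
       else count)
      = if pvWins gifts k kk then count + 1 else count := by
    intro count kk
    rw [hval k kk, hval kk k, hbal k, hbal kk, pvChain_eq]
  rw [PySem.List.foldl_congr_mem _ _ (fun count kk => if pvWins gifts k kk then count + 1 else count) _
    (fun acc' x _ => hbody acc' x)]
  rw [PySem.List.foldl_if_add_one, pvCountP_dedup_filter, zero_add]
  rfl

lemma pvB_eq (friends gifts : List String) (hpre : Pre_solution friends gifts) :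
    solution_alt friends gifts
      = PySem.List.maxD ((PySem.List.dedup friends).map (fun k => (pvCount friends gifts k : Int)))
          (fun y => y) 0 := by
  have hp : ∀ g ∈ gifts, pvGiftOK friends g = true := List.all_eq_true.mp hpre
  unfold solution_alt
  dsimp only
  set names := PySem.List.dedup friends with hnames
  have hnd : names.Nodup := PySem.List.nodup_dedup friends
  set b0 : PySem.Dict String Int := PySem.Dict.ofList (names.map (fun k => (k, (0 : Int)))) with hb0
  obtain ⟨hcnt, hbal⟩ := pvBfold friends gifts hp PySem.Dict.empty b0
  have hv : ∀ p, (gifts.foldl pvStepB (PySem.Dict.empty, b0)).1.getD p 0 = pvGc gifts p.1 p.2 := by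
    intro p
    rw [hcnt p, PySem.Dict.getD_empty]
    unfold pvGc
    ring
  have hb : ∀ x, (gifts.foldl pvStepB (PySem.Dict.empty, b0)).2.getD x 0 = pvBalP gifts x := by
    intro x
    rw [hbal x, pvGetD_ofList_zero names x]
    unfold pvBalP
    ring
  have hwd : ∀ a b, pvWinsD (gifts.foldl pvStepB (PySem.Dict.empty, b0)).1
      (gifts.foldl pvStepB (PySem.Dict.empty, b0)).2 a b = pvWins gifts a b := by
    intro a b
    unfold pvWinsD pvWins
    rw [hv (a, b), hv (b, a), hb a, hb b]
  have hs0keys : b0.keys = names := by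
    rw [hb0, pvKeys_ofList_map, pvDedup_of_nodup names hnd]
  have hskeys : (pvScoreLoop (gifts.foldl pvStepB (PySem.Dict.empty, b0)).1
      (gifts.foldl pvStepB (PySem.Dict.empty, b0)).2 names b0).keys = names := by
    rw [pvScoreLoop_keys _ _ _ _ (fun x hx => by rw [hs0keys]; exact hx), hs0keys]
  rw [PySem.Dict.values_eq_map_keys _ (by rw [hskeys]; exact hnd) 0, hskeys]
  congr 1
  apply List.map_congr_left
  intro k hk
  rw [pvScoreLoop_getD _ _ _ _ _ hnd, pvGetD_ofList_zero names k, if_pos hk, zero_add]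
  unfold pvCount
  congr 1
  apply List.countP_congr
  intro x _
  rw [hwd k x]

-- ===== VERDICT (by name: the statement is the Claim_ definition above) =====
theorem solution_spec : Claim_equal_solution := by
  intro friends gifts _ hpre
  unfold Spec_solution
  rw [pvA_eq friends gifts hpre, pvB_eq friends gifts hpre, pvMaxD_eq, ← List.foldl_map]
  · intro x hx
    simp only [List.mem_map] at hx
    obtain ⟨k, _, rfl⟩ := hx
    exact Int.natCast_nonneg _
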